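-- pv_equiv track=rewrite | github.com/quanglamtrinh/PlanningTreev2 | backend/storage/node_files.py | _parse_list_content
-- ===== SOURCE A (Python) =====
-- def _parse_list_content(content: str) -> list[str]:
--     if not content.strip():
--         return []
--     items: list[str] = []
--     for line in content.splitlines():
--         stripped = line.strip()
--         if not stripped:
--             continue
--         if stripped.startswith("- "):
--             items.append(stripped[2:].strip())
--             continue
--         if not items:
--             raise ValueError("List subsection content must use bullet list items.")
--         items[-1] = f"{items[-1]}\n{stripped}".strip()
--     return items
-- ===== SOURCE B (Python) =====
-- def _parse_list_content(content: str) -> list[str]: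
--     cleaned = [s for line in content.splitlines() if (s := line.strip())]
--     if not cleaned:
--         return []
--     text = "\n".join(cleaned)
--     if not text.startswith("- "):
--         raise ValueError("List subsection content must use bullet list items.")
--     return [piece.strip() for piece in text[2:].split("\n- ")]
-- ===== Notes on version B (the rewrite author's own statement) =====
-- stated objective: alternative
-- what changed: A groups lines with a stateful loop that mutates items[-1]; B does no line grouping at all: it joins the cleaned lines into one newline-separated string and recovers the items with a single string split on the three-character bullet separator (newline, dash, space), then strips each piece.
import Mathlib
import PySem

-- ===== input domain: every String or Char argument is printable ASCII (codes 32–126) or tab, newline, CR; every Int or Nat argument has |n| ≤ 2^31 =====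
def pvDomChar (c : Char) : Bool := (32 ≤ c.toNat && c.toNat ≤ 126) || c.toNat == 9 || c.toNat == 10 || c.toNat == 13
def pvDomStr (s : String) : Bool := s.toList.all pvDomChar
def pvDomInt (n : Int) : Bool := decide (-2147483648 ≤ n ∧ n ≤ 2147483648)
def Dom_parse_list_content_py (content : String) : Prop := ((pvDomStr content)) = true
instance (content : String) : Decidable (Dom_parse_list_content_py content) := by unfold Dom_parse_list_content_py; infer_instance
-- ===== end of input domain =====

-- B replaces A's stateful grouping loop (which mutates items[-1]) by a join-then-split
-- algorithm: join the cleaned lines with newlines and split the joined text on the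
-- bullet separator (newline, dash, space);
-- equal return value proved on Pre_ (outside Pre_ both A and B raise the same ValueError).

-- ===== PORT A =====
-- A's loop body over one raw line. String facts are stated on the List Char side, as the
-- PySem prelude prescribes; the ports convert at the boundary only.
-- The `if items = [] then []` arm is Python's `raise ValueError(...)`, excluded by Pre_.
def pvAStep (items : List (List Char)) (line : List Char) : List (List Char) :=
  let stripped := PySem.Chars.strip line
  if stripped = [] then items
  else if PySem.Chars.startswith stripped ['-', ' '] then
    items ++ [PySem.Chars.strip (PySem.List.slice stripped (some 2) none)]
  else if items = [] then []  -- raise ValueError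
  else items.dropLast ++ [PySem.Chars.strip (items.getLast! ++ '\n' :: stripped)]

def parse_list_content_py (content : String) : List String :=
  if PySem.Str.strip content = "" then []
  else ((PySem.Chars.splitlines content.toList).foldl pvAStep []).map String.ofList

-- ===== PORT B =====
-- cleaned = non-empty stripped lines; text = '\n'.join(cleaned);
-- result = strip of each piece of text[2:] split on the bullet separator
def parse_list_content_py_alt (content : String) : List String :=
  let cleaned := ((PySem.Chars.splitlines content.toList).map PySem.Chars.strip).filter (· ≠ [])
  if cleaned = [] then []
  else
    let text := PySem.Chars.join ['\n'] cleaned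
    if PySem.Chars.startswith text ['-', ' '] then
      ((PySem.Chars.splitOn (PySem.List.slice text (some 2) none) ['\n', '-', ' ']).map
        PySem.Chars.strip).map String.ofList
    else []  -- raise ValueError

-- ===== PRECONDITION & SPEC =====
-- Pre_ excludes exactly the inputs on which A raises ValueError (some non-empty stripped
-- line precedes any bullet line); B raises the very same ValueError there.
def Pre_parse_list_content_py (content : String) : Prop :=
  ((PySem.Chars.splitlines content.toList).map PySem.Chars.strip).filter (· ≠ []) = [] ∨
  PySem.Chars.startswith (((PySem.Chars.splitlines content.toList).map PySem.Chars.strip).filter (· ≠ [])).head! ['-', ' '] = true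
instance (content : String) : Decidable (Pre_parse_list_content_py content) := by unfold Pre_parse_list_content_py; infer_instance
def pvWitness_parse_list_content_py : String := "- alpha\n  beta\n- gamma"
def Spec_parse_list_content_py (content : String) (out : List String) : Prop := out = parse_list_content_py_alt content
instance (content : String) (out : List String) : Decidable (Spec_parse_list_content_py content out) := by unfold Spec_parse_list_content_py; infer_instance

-- ===== CLAIM (what is proved, stated in full; the proofs are below) =====
def Claim_equal_parse_list_content_py : Prop := ∀ (content : String), Dom_parse_list_content_py content → Pre_parse_list_content_py content → Spec_parse_list_content_py content (parse_list_content_py content)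

-- ===== LEMMAS AND PROOFS =====

-- the separator B splits on, and flattened "\n"-prefixed continuation text
def pvSep : List Char := ['\n', '-', ' ']
def pvTfl (ls : List (List Char)) : List Char := (ls.map (fun s => '\n' :: s)).flatten

-- abstract piece list both programs are reduced to
def pvPcs : List Char → List (List Char) → List (List Char)
  | cur, [] => [cur]
  | cur, s :: rest =>
    if PySem.Chars.startswith s ['-', ' '] then cur :: pvPcs (s.drop 2) rest
    else pvPcs (cur ++ '\n' :: s) rest

-- A's loop body on an already-stripped non-empty line
def pvCore (items : List (List Char)) (s : List Char) : List (List Char) :=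
  if PySem.Chars.startswith s ['-', ' '] then
    items ++ [PySem.Chars.strip (PySem.List.slice s (some 2) none)]
  else if items = [] then []
  else items.dropLast ++ [PySem.Chars.strip (items.getLast! ++ '\n' :: s)]

lemma pv_getLast!_concat {α : Type} [Inhabited α] (l : List α) (x : α) : (l ++ [x]).getLast! = x := by
  induction l with
  | nil => rfl
  | cons a l ih => simp [List.getLast!]

lemma pv_rstrip_prefix (y : List Char) : (PySem.Chars.rstrip y).IsPrefix y := by
  simpa [PySem.Chars.rstrip] using
    (List.IsSuffix.reverse (List.dropWhile_suffix (l := y.reverse) PySem.Chars.isspace))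

lemma pv_lstrip_of_strip (x : List Char) (h : PySem.Chars.strip x = x) :
    PySem.Chars.lstrip x = x := by
  have hsuf : (PySem.Chars.lstrip x).IsSuffix x := List.dropWhile_suffix _
  apply hsuf.eq_of_length
  have h1 : (PySem.Chars.lstrip x).length ≤ x.length := hsuf.length_le
  have h2 := (pv_rstrip_prefix (PySem.Chars.lstrip x)).length_le
  rw [show PySem.Chars.rstrip (PySem.Chars.lstrip x) = x from h] at h2
  omega

lemma pv_rstrip_of_strip (x : List Char) (h : PySem.Chars.strip x = x) :
    PySem.Chars.rstrip x = x := by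
  have := pv_lstrip_of_strip x h
  calc PySem.Chars.rstrip x = PySem.Chars.strip x := by rw [PySem.Chars.strip, this]
    _ = x := h

lemma pv_head_not_space (x : List Char) (h : PySem.Chars.lstrip x = x) (hne : x ≠ []) :
    ∃ c t, x = c :: t ∧ PySem.Chars.isspace c = false := by
  rcases x with _ | ⟨c, t⟩
  · exact absurd rfl hne
  · refine ⟨c, t, rfl, ?_⟩
    by_contra hc
    simp only [Bool.not_eq_false] at hc
    have h1 := congrArg List.length h
    simp only [PySem.Chars.lstrip, List.dropWhile_cons, hc, if_true] at h1
    have h2 := List.length_dropWhile_le (p := PySem.Chars.isspace) (l := t)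
    simp at h1
    omega

lemma pv_rstrip_reverse_eq (b : List Char) (h : PySem.Chars.rstrip b = b) :
    List.dropWhile PySem.Chars.isspace b.reverse = b.reverse := by
  have := congrArg List.reverse h
  simpa [PySem.Chars.rstrip] using this

lemma pv_rstrip_append (a b : List Char) (h : PySem.Chars.rstrip b = b) (hb : b ≠ []) :
    PySem.Chars.rstrip (a ++ b) = a ++ b := by
  have hrev := pv_rstrip_reverse_eq b h
  have hbne : b.reverse ≠ [] := by simpa using hb
  obtain ⟨c, t, hct, hc⟩ := pv_head_not_space b.reverse hrev hbne
  have : (a ++ b).reverse = c :: (t ++ a.reverse) := by simp [hct]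
  rw [PySem.Chars.rstrip, this, List.dropWhile_cons_of_neg (by simp [hc])]
  have := congrArg List.reverse this
  simpa using this.symm

lemma pv_strip_idem (x : List Char) : PySem.Chars.strip (PySem.Chars.strip x) = PySem.Chars.strip x := by
  rcases hx : PySem.Chars.strip x with _ | ⟨c, t⟩
  · rfl
  · have hpre : (c :: t).IsPrefix (PySem.Chars.lstrip x) := hx ▸ pv_rstrip_prefix _
    have hl : PySem.Chars.lstrip (PySem.Chars.lstrip x) = PySem.Chars.lstrip x :=
      List.dropWhile_idempotent _ _
    obtain ⟨r, hr⟩ := hpre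
    have hxne : PySem.Chars.lstrip x ≠ [] := by
      intro hnil; rw [hnil] at hr; simp at hr
    obtain ⟨c', t', hct, hc'⟩ := pv_head_not_space _ hl hxne
    have hcc : c' = c := by
      rw [hct] at hr; cases hr; rfl
    have hl2 : PySem.Chars.lstrip (c :: t) = c :: t := by
      simp [PySem.Chars.lstrip, hcc ▸ hc']
    have hr2 : PySem.Chars.rstrip (c :: t) = c :: t := by
      rw [← hx]
      show PySem.Chars.rstrip (PySem.Chars.strip x) = PySem.Chars.strip x
      rw [PySem.Chars.strip, PySem.Chars.rstrip, PySem.Chars.rstrip]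
      simp [List.dropWhile_idempotent]
    rw [PySem.Chars.strip, hl2, hr2]

lemma pv_all_space_of_strip_nil (x : List Char) (h : PySem.Chars.strip x = []) :
    ∀ c ∈ x, PySem.Chars.isspace c = true := by
  intro c hc
  have hx : List.takeWhile PySem.Chars.isspace x ++ PySem.Chars.lstrip x = x :=
    List.takeWhile_append_dropWhile
  have hall : ∀ d ∈ PySem.Chars.lstrip x, PySem.Chars.isspace d = true := by
    intro d hd
    have : List.dropWhile PySem.Chars.isspace (PySem.Chars.lstrip x).reverse = [] := by
      have := congrArg List.reverse h
      simpa [PySem.Chars.strip, PySem.Chars.rstrip] using this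
    exact List.dropWhile_eq_nil_iff.mp this d (by simpa using hd)
  rw [← hx] at hc
  rcases List.mem_append.mp hc with h1 | h1
  · exact List.mem_takeWhile_imp h1
  · exact hall c h1

lemma pv_strip_nil_of_all_space (x : List Char) (h : ∀ c ∈ x, PySem.Chars.isspace c = true) :
    PySem.Chars.strip x = [] := by
  have : PySem.Chars.lstrip x = [] := List.dropWhile_eq_nil_iff.mpr h
  simp [PySem.Chars.strip, this, PySem.Chars.rstrip]

lemma pv_go_mem (isB : Char → Bool) (s cur : List Char) (acc : List (List Char)) :
    ∀ l ∈ PySem.Chars.splitlines.go isB s cur acc, ∀ c ∈ l, c ∈ s ∨ c ∈ cur ∨ ∃ l' ∈ acc, c ∈ l' := by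
  fun_induction PySem.Chars.splitlines.go isB s cur acc with
  | case1 cur acc h =>
    intro l hl c hc
    exact Or.inr (Or.inr ⟨l, by simpa using hl, hc⟩)
  | case2 cur acc h =>
    intro l hl c hc
    simp only [List.mem_reverse, List.mem_cons] at hl
    rcases hl with h1 | h1
    · subst h1; exact Or.inr (Or.inl (by simpa using hc))
    · exact Or.inr (Or.inr ⟨l, h1, hc⟩)
  | case3 rest cur acc ih =>
    intro l hl c hc
    rcases ih l hl c hc with h1 | h1 | ⟨l', hl', hc'⟩
    · exact Or.inl (by simp [h1])
    · simp at h1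
    · rcases List.mem_cons.mp hl' with h2 | h2
      · subst h2; exact Or.inr (Or.inl (by simpa using hc'))
      · exact Or.inr (Or.inr ⟨l', h2, hc'⟩)
  | case4 c0 rest cur acc hne hB ih =>
    intro l hl c hc
    rcases ih l hl c hc with h1 | h1 | ⟨l', hl', hc'⟩
    · exact Or.inl (by simp [h1])
    · simp at h1
    · rcases List.mem_cons.mp hl' with h2 | h2
      · subst h2; exact Or.inr (Or.inl (by simpa using hc'))
      · exact Or.inr (Or.inr ⟨l', h2, hc'⟩)
  | case5 c0 rest cur acc hne hB ih =>
    intro l hl c hc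
    rcases ih l hl c hc with h1 | h1 | hx
    · exact Or.inl (by simp [h1])
    · rcases List.mem_cons.mp h1 with h2 | h2
      · exact Or.inl (by simp [h2])
      · exact Or.inr (Or.inl h2)
    · exact Or.inr (Or.inr hx)

lemma pv_splitlines_mem (cs : List Char) (l : List Char) (hl : l ∈ PySem.Chars.splitlines cs)
    (c : Char) (hc : c ∈ l) : c ∈ cs := by
  rw [PySem.Chars.splitlines] at hl
  rcases pv_go_mem _ cs [] [] l hl c hc with h | h | ⟨l', hl', _⟩
  · exact h
  · simp at h
  · simp at hl'

lemma pv_cleaned_nil_of_strip_nil (cs : List Char) (h : PySem.Chars.strip cs = []) :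
    ((PySem.Chars.splitlines cs).map PySem.Chars.strip).filter (· ≠ []) = [] := by
  rw [List.filter_eq_nil_iff]
  intro x hx
  simp only [List.mem_map] at hx
  obtain ⟨l, hl, rfl⟩ := hx
  have : PySem.Chars.strip l = [] := by
    apply pv_strip_nil_of_all_space
    intro c hc
    exact pv_all_space_of_strip_nil cs h c (pv_splitlines_mem cs l hl c hc)
  simp [this]

lemma pv_foldl_A (L : List (List Char)) (items : List (List Char)) :
    L.foldl pvAStep items = ((L.map PySem.Chars.strip).filter (· ≠ [])).foldl pvCore items := by
  induction L generalizing items with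
  | nil => rfl
  | cons l L ih =>
    by_cases h : PySem.Chars.strip l = []
    · simp only [List.foldl_cons, List.map_cons, List.filter_cons, h]
      rw [show pvAStep items l = items by simp [pvAStep, h]]
      simpa using ih items
    · simp only [List.foldl_cons, List.map_cons, List.filter_cons]
      rw [if_pos (by simpa using h)]
      rw [show pvAStep items l = pvCore items (PySem.Chars.strip l) by
        simp [pvAStep, pvCore, h]]
      exact ih _

lemma pv_mem_cleaned (cs : List Char) (t : List Char)
    (ht : t ∈ ((PySem.Chars.splitlines cs).map PySem.Chars.strip).filter (· ≠ [])) :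
    PySem.Chars.strip t = t ∧ t ≠ [] := by
  have h1 := List.mem_of_mem_filter ht
  have h2 := List.of_mem_filter ht
  simp only [List.mem_map] at h1
  obtain ⟨l, _, rfl⟩ := h1
  refine ⟨pv_strip_idem l, by simpa using h2⟩

-- no splitlines output line contains '\n'
lemma pv_go_noB (isB : Char → Bool) (s cur : List Char) (acc : List (List Char))
    (hcur : ∀ c ∈ cur, isB c = false) (hacc : ∀ l ∈ acc, ∀ c ∈ l, isB c = false) :
    ∀ l ∈ PySem.Chars.splitlines.go isB s cur acc, ∀ c ∈ l, isB c = false := by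
  fun_induction PySem.Chars.splitlines.go isB s cur acc with
  | case1 cur acc h =>
    intro l hl
    exact hacc l (by simpa using hl)
  | case2 cur acc h =>
    intro l hl
    simp only [List.mem_reverse, List.mem_cons] at hl
    rcases hl with h1 | h1
    · subst h1; intro c hc; exact hcur c (by simpa using hc)
    · exact hacc l h1
  | case3 rest cur acc ih =>
    refine ih (by simp) ?_
    intro l hl
    rcases List.mem_cons.mp hl with h1 | h1
    · subst h1; intro c hc; exact hcur c (by simpa using hc)
    · exact hacc l h1
  | case4 c0 rest cur acc hne hB ih =>
    refine ih (by simp) ?_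
    intro l hl
    rcases List.mem_cons.mp hl with h1 | h1
    · subst h1; intro c hc; exact hcur c (by simpa using hc)
    · exact hacc l h1
  | case5 c0 rest cur acc hne hB ih =>
    refine ih ?_ hacc
    intro c hc
    rcases List.mem_cons.mp hc with h1 | h1
    · subst h1; simpa using hB
    · exact hcur c h1

lemma pv_splitlines_no_nl (cs : List Char) (l : List Char)
    (hl : l ∈ PySem.Chars.splitlines cs) : '\n' ∉ l := by
  intro hc
  rw [PySem.Chars.splitlines] at hl
  have := pv_go_noB _ cs [] [] (by simp) (by simp) l hl '\n' hc
  simp at this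

lemma pv_mem_strip (l : List Char) (c : Char) (hc : c ∈ PySem.Chars.strip l) : c ∈ l := by
  have h1 : c ∈ PySem.Chars.lstrip l := by
    have : PySem.Chars.strip l = PySem.Chars.rstrip (PySem.Chars.lstrip l) := rfl
    rw [this, PySem.Chars.rstrip] at hc
    have := (List.dropWhile_sublist (l := (PySem.Chars.lstrip l).reverse) PySem.Chars.isspace).subset
    have h2 : c ∈ (PySem.Chars.lstrip l).reverse := this (by simpa using hc)
    simpa using h2
  exact (List.dropWhile_sublist (l := l) PySem.Chars.isspace).subset h1

lemma pv_cleaned_no_nl (cs : List Char) (t : List Char)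
    (ht : t ∈ ((PySem.Chars.splitlines cs).map PySem.Chars.strip).filter (· ≠ [])) :
    '\n' ∉ t := by
  have h1 := List.mem_of_mem_filter ht
  simp only [List.mem_map] at h1
  obtain ⟨l, hl, rfl⟩ := h1
  intro hc
  exact pv_splitlines_no_nl cs l hl (pv_mem_strip l '\n' hc)

-- bullet decomposition
lemma pv_bullet_decomp (s : List Char) (h : PySem.Chars.startswith s ['-', ' '] = true) :
    ∃ x, s = '-' :: ' ' :: x := by
  obtain ⟨r, hr⟩ := (PySem.Chars.startswith_iff s ['-', ' ']).mp h
  exact ⟨r, hr.symm⟩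

lemma pv_drop2_rstrip (x : List Char) (h : PySem.Chars.strip ('-' :: ' ' :: x) = '-' :: ' ' :: x) :
    PySem.Chars.rstrip x = x ∧ x ≠ [] := by
  have hrs : PySem.Chars.rstrip ('-' :: ' ' :: x) = '-' :: ' ' :: x := pv_rstrip_of_strip _ h
  rcases hx : x with _ | ⟨d0, t0⟩
  · subst hx
    have : PySem.Chars.rstrip ['-', ' '] = ['-'] := by decide
    rw [this] at hrs
    simp at hrs
  · subst hx
    have hrev := pv_rstrip_reverse_eq _ hrs
    have hne : ('-' :: ' ' :: d0 :: t0).reverse ≠ [] := by simp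
    obtain ⟨c, t, hct, hc⟩ := pv_head_not_space _ hrev hne
    have hshape : ('-' :: ' ' :: d0 :: t0).reverse = (d0 :: t0).reverse ++ [' ', '-'] := by simp
    obtain ⟨d, t', hdt⟩ : ∃ d t', (d0 :: t0).reverse = d :: t' := by
      rcases h' : (d0 :: t0).reverse with _ | ⟨d, t'⟩
      · exfalso; have := congrArg List.length h'; simp at this
      · exact ⟨d, t', rfl⟩
    have hcd : c = d := by
      rw [hshape, hdt] at hct
      exact (List.cons.injEq _ _ _ _ ▸ hct).1.symm
    refine ⟨?_, by simp⟩
    rw [PySem.Chars.rstrip, hdt, List.dropWhile_cons_of_neg (by simp [hcd ▸ hc]), ← hdt]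
    simp

-- strip l = lstrip l when l has no trailing whitespace
lemma pv_strip_eq_lstrip (l : List Char) (h : PySem.Chars.rstrip l = l) :
    PySem.Chars.strip l = PySem.Chars.lstrip l := by
  by_cases h0 : PySem.Chars.lstrip l = []
  · rw [PySem.Chars.strip, h0]; simp [PySem.Chars.rstrip]
  · have hl0 : l ≠ [] := by intro h1; subst h1; exact h0 rfl
    have hrev := pv_rstrip_reverse_eq l h
    have hlne : l.reverse ≠ [] := by simpa using hl0
    obtain ⟨c, t, hct, hc⟩ := pv_head_not_space l.reverse (by simpa [PySem.Chars.lstrip] using hrev) hlne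
    -- (lstrip l).reverse is a nonempty prefix of l.reverse, hence starts with c
    have hsuf : (PySem.Chars.lstrip l).IsSuffix l := List.dropWhile_suffix _
    obtain ⟨p, hp⟩ := hsuf
    have hpre : (PySem.Chars.lstrip l).reverse.IsPrefix l.reverse := by
      refine ⟨p.reverse, ?_⟩
      rw [← List.reverse_append, hp]
    obtain ⟨d, t', hdt⟩ : ∃ d t', (PySem.Chars.lstrip l).reverse = d :: t' := by
      rcases h' : (PySem.Chars.lstrip l).reverse with _ | ⟨d, t'⟩
      · exfalso; exact h0 (by simpa using congrArg List.reverse h')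
      · exact ⟨d, t', rfl⟩
    obtain ⟨r, hr⟩ := hpre
    have hcd : d = c := by
      rw [hdt] at hr
      rw [hct] at hr
      exact (List.cons.injEq _ _ _ _ ▸ hr).1
    rw [PySem.Chars.strip, PySem.Chars.rstrip, hdt,
      List.dropWhile_cons_of_neg (by simp [hcd ▸ hc]), ← hdt]
    simp

lemma pv_strip_drop_spaces (sp y : List Char) (h : ∀ c ∈ sp, PySem.Chars.isspace c = true) :
    PySem.Chars.strip (sp ++ y) = PySem.Chars.strip y := by
  have h1 : PySem.Chars.lstrip (sp ++ y) = PySem.Chars.lstrip y := by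
    show List.dropWhile _ _ = _
    rw [List.dropWhile_append, List.dropWhile_eq_nil_iff.mpr h]
    simp [PySem.Chars.lstrip]
  rw [PySem.Chars.strip, PySem.Chars.strip, h1]

lemma pv_strip_merge (cur z : List Char) (h : PySem.Chars.rstrip cur = cur) :
    PySem.Chars.strip (PySem.Chars.strip cur ++ z) = PySem.Chars.strip (cur ++ z) := by
  have hdecomp : List.takeWhile PySem.Chars.isspace cur ++ PySem.Chars.lstrip cur = cur :=
    List.takeWhile_append_dropWhile
  calc PySem.Chars.strip (PySem.Chars.strip cur ++ z)
      = PySem.Chars.strip (PySem.Chars.lstrip cur ++ z) := by rw [pv_strip_eq_lstrip cur h]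
    _ = PySem.Chars.strip (List.takeWhile PySem.Chars.isspace cur ++ (PySem.Chars.lstrip cur ++ z)) := by
        rw [pv_strip_drop_spaces _ _ (fun c hc => List.mem_takeWhile_imp hc)]
    _ = PySem.Chars.strip (cur ++ z) := by rw [← List.append_assoc, hdecomp]

-- the separator never occurs inside a piece built from '\n'-free lines whose
-- continuations are non-empty and not bullets
lemma pv_no_sep (cs : List (List Char)) : ∀ (p : List Char), '\n' ∉ p →
    (∀ q ∈ cs, '\n' ∉ q ∧ q ≠ [] ∧ PySem.Chars.startswith q ['-', ' '] = false) →
    ¬ pvSep <:+: (p ++ pvTfl cs) := by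
  induction cs with
  | nil =>
    intro p hp _
    induction p with
    | nil => intro h; have := h.sublist.length_le; simp [pvSep, pvTfl] at this
    | cons c p ih =>
      intro h
      rcases List.infix_cons_iff.mp h with h1 | h1
      · obtain ⟨heq, _⟩ := List.cons_prefix_cons.mp h1
        exact hp (by simp [← heq])
      · exact ih (fun hc => hp (by simp [hc])) h1
  | cons q cs ihcs =>
    intro p hp hq
    induction p with
    | nil =>
      intro h
      have hqh := hq q (by simp)
      simp only [pvTfl, List.map_cons, List.flatten_cons, List.nil_append] at h
      rcases List.infix_cons_iff.mp h with h1 | h1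
      · -- pvSep <+: '\n' :: (q ++ pvTfl cs)
        obtain ⟨_, h2⟩ := List.cons_prefix_cons.mp h1
        rcases hq2 : q with _ | ⟨a, q'⟩
        · exact hqh.2.1 hq2
        · rw [hq2] at h2
          try simp only [List.cons_append] at h2
          obtain ⟨ha, h3⟩ := List.cons_prefix_cons.mp h2
          rcases hq3 : q' with _ | ⟨b, q''⟩
          · rw [hq3] at h3
            try simp only [List.nil_append] at h3
            rcases cs with _ | ⟨r, cs'⟩
            · have := h3.sublist.length_le; simp at this
            · simp only [List.map_cons, List.flatten_cons] at h3
              obtain ⟨hb, _⟩ := List.cons_prefix_cons.mp h3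
              exact absurd hb (by decide)
          · rw [hq3] at h3
            try simp only [List.cons_append] at h3
            obtain ⟨hb, _⟩ := List.cons_prefix_cons.mp h3
            have : PySem.Chars.startswith q ['-', ' '] = true := by
              rw [hq2, hq3, PySem.Chars.startswith_iff]
              exact ⟨q'', by rw [← ha, ← hb]; rfl⟩
            rw [hqh.2.2] at this; exact absurd this (by simp)
      · -- pvSep <:+: q ++ pvTfl cs
        exact ihcs q hqh.1 (fun r hr => hq r (by simp [hr])) h1
    | cons c p ihp =>
      intro h
      try simp only [List.cons_append] at h
      rcases List.infix_cons_iff.mp h with h1 | h1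
      · obtain ⟨heq, _⟩ := List.cons_prefix_cons.mp h1
        exact hp (by simp [← heq])
      · exact ihp (fun hc => hp (by simp [hc])) h1

-- splitOn.go closes the current piece at a separator occurrence
lemma pv_go_step (p : List Char) : ∀ (rest cur : List Char) (acc : List (List Char)) (f1 f2 : Nat),
    f1 = p.length + 1 + f2 → ¬ pvSep <:+: p →
    PySem.Chars.splitOn.go pvSep f1 (p ++ pvSep ++ rest) cur acc
      = PySem.Chars.splitOn.go pvSep f2 rest [] ((cur.reverse ++ p) :: acc) := by
  induction p with
  | nil =>
    intro rest cur acc f1 f2 hf _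
    subst hf
    have hlen : ([] : List Char).length + 1 + f2 = f2 + 1 := by simp; omega
    rw [hlen, PySem.Chars.splitOn.go.eq_def]
    simp [pvSep, List.isPrefixOf]
  | cons c p ih =>
    intro rest cur acc f1 f2 hf hinf
    subst hf
    have hnp : pvSep.isPrefixOf ((c :: p) ++ pvSep ++ rest) = false := by
      rw [Bool.eq_false_iff]
      intro hpre
      have hpre' := List.isPrefixOf_iff_prefix.mp hpre
      simp only [pvSep, List.cons_append] at hpre'
      obtain ⟨hc, h2⟩ := List.cons_prefix_cons.mp hpre'
      rcases hp : p with _ | ⟨d, p'⟩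
      · rw [hp] at h2
        simp only [List.nil_append, List.cons_append] at h2
        obtain ⟨hd, _⟩ := List.cons_prefix_cons.mp h2
        exact absurd hd (by decide)
      · rw [hp] at h2
        try simp only [List.cons_append] at h2
        obtain ⟨hd, h3⟩ := List.cons_prefix_cons.mp h2
        rcases hp' : p' with _ | ⟨e, p''⟩
        · rw [hp'] at h3
          simp only [List.nil_append, List.cons_append] at h3
          obtain ⟨he, _⟩ := List.cons_prefix_cons.mp h3
          exact absurd he (by decide)
        · rw [hp'] at h3
          try simp only [List.cons_append] at h3
          obtain ⟨he, _⟩ := List.cons_prefix_cons.mp h3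
          apply hinf
          refine (List.IsPrefix.isInfix ?_)
          rw [hp, hp', ← hc, ← hd, ← he]
          exact ⟨p'', by simp [pvSep]⟩
    have hstep : PySem.Chars.splitOn.go pvSep ((p.length + 1 + f2) + 1) ((c :: p) ++ pvSep ++ rest) cur acc
        = PySem.Chars.splitOn.go pvSep (p.length + 1 + f2) (p ++ pvSep ++ rest) (c :: cur) acc := by
      rw [PySem.Chars.splitOn.go.eq_def]
      simp only [List.cons_append, List.append_assoc] at hnp ⊢
      simp [hnp]
    have hlen : (c :: p).length + 1 + f2 = (p.length + 1 + f2) + 1 := by simp; omega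
    rw [hlen, hstep, ih rest (c :: cur) acc _ f2 rfl (fun h => hinf (List.infix_cons h))]
    simp

-- splitOn.go on a piece with no separator occurrence
lemma pv_go_last (l : List Char) : ∀ (cur : List Char) (acc : List (List Char)) (fuel : Nat),
    l.length < fuel → ¬ pvSep <:+: l →
    PySem.Chars.splitOn.go pvSep fuel l cur acc = acc.reverse ++ [cur.reverse ++ l] := by
  induction l with
  | nil =>
    intro cur acc fuel hf _
    rcases fuel with _ | f
    · omega
    · rw [PySem.Chars.splitOn.go.eq_def]
      simp
  | cons c l ih =>
    intro cur acc fuel hf hinf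
    rcases fuel with _ | f
    · omega
    · have hnp : pvSep.isPrefixOf (c :: l) = false := by
        rw [Bool.eq_false_iff]
        intro hpre
        exact hinf (List.IsPrefix.isInfix (List.isPrefixOf_iff_prefix.mp hpre))
      rw [PySem.Chars.splitOn.go.eq_def]
      simp only [hnp]
      rw [ih (c :: cur) acc f (by simpa using hf) (fun h => hinf (List.infix_cons h))]
      simp

-- splitOn of a piece-structured text recovers exactly the pieces
lemma pv_go_pcs (rest : List (List Char)) : ∀ (p : List Char) (cs : List (List Char))
    (acc : List (List Char)) (fuel : Nat),
    '\n' ∉ p →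
    (∀ q ∈ cs, '\n' ∉ q ∧ q ≠ [] ∧ PySem.Chars.startswith q ['-', ' '] = false) →
    (∀ s ∈ rest, '\n' ∉ s ∧ s ≠ []) →
    PySem.Chars.splitOn.go pvSep (((p ++ pvTfl cs) ++ pvTfl rest).length + 1 + fuel)
        ((p ++ pvTfl cs) ++ pvTfl rest) [] acc
      = acc.reverse ++ pvPcs (p ++ pvTfl cs) rest := by
  induction rest with
  | nil =>
    intro p cs acc fuel hp hcs _
    rw [show pvTfl [] = [] from rfl, List.append_nil]
    rw [pv_go_last _ [] acc _ (by omega) (pv_no_sep cs p hp hcs)]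
    simp [pvPcs]
  | cons s rest ih =>
    intro p cs acc fuel hp hcs hrest
    have hs := hrest s (by simp)
    by_cases hb : PySem.Chars.startswith s ['-', ' '] = true
    · obtain ⟨x, hx⟩ := pv_bullet_decomp s hb
      have hxnl : '\n' ∉ x := by
        intro h; exact hs.1 (by simp [hx, h])
      have hsplit : (p ++ pvTfl cs) ++ pvTfl (s :: rest)
          = (p ++ pvTfl cs) ++ pvSep ++ ((x ++ pvTfl []) ++ pvTfl rest) := by
        simp [pvTfl, hx, pvSep]
      rw [hsplit]
      rw [pv_go_step (p ++ pvTfl cs) _ [] acc _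
        (((x ++ pvTfl []) ++ pvTfl rest).length + 1 + (fuel + 2))
        (by simp [pvSep, pvTfl]; omega)
        (pv_no_sep cs p hp hcs)]
      rw [ih x [] _ (fuel + 2) hxnl (by simp) (fun t ht => hrest t (by simp [ht]))]
      have hdrop : s.drop 2 = x := by simp [hx]
      simp [pvPcs, hb, hdrop, pvTfl]
    · have hsplit : (p ++ pvTfl cs) ++ pvTfl (s :: rest)
          = (p ++ pvTfl (cs ++ [s])) ++ pvTfl rest := by
        simp [pvTfl]
      rw [hsplit]
      rw [ih p (cs ++ [s]) acc fuel hp ?_ (fun t ht => hrest t (by simp [ht]))]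
      · have hcur : p ++ pvTfl (cs ++ [s]) = (p ++ pvTfl cs) ++ '\n' :: s := by
          simp [pvTfl]
        rw [hcur]
        simp [pvPcs, hb]
      · intro q hq
        rcases List.mem_append.mp hq with h1 | h1
        · exact hcs q h1
        · simp only [List.mem_singleton] at h1
          subst h1
          exact ⟨hs.1, hs.2, by simpa using hb⟩

-- A's loop over the cleaned tail produces the stripped pieces
lemma pv_core_pcs (rest : List (List Char)) : ∀ (gsF : List (List Char)) (cur : List Char),
    PySem.Chars.rstrip cur = cur →
    (∀ s ∈ rest, PySem.Chars.strip s = s ∧ s ≠ []) →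
    List.foldl pvCore (gsF ++ [PySem.Chars.strip cur]) rest
      = gsF ++ (pvPcs cur rest).map PySem.Chars.strip := by
  induction rest with
  | nil =>
    intro gsF cur _ _
    simp [pvPcs]
  | cons s rest ih =>
    intro gsF cur hcur hrest
    have hs := hrest s (by simp)
    simp only [List.foldl_cons]
    by_cases hb : PySem.Chars.startswith s ['-', ' '] = true
    · obtain ⟨x, hx⟩ := pv_bullet_decomp s hb
      have hxr : PySem.Chars.rstrip x = x := (pv_drop2_rstrip x (hx ▸ hs.1)).1
      have hslice : PySem.List.slice s (some 2) none = x := by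
        rw [PySem.List.slice_from _ (show (0:Int) ≤ 2 by omega)]
        simp [hx]
      rw [show pvCore (gsF ++ [PySem.Chars.strip cur]) s
            = (gsF ++ [PySem.Chars.strip cur]) ++ [PySem.Chars.strip x] by
          simp [pvCore, hb, hslice]]
      rw [ih (gsF ++ [PySem.Chars.strip cur]) x hxr (fun t ht => hrest t (by simp [ht]))]
      have hdrop : s.drop 2 = x := by simp [hx]
      simp [pvPcs, hb, hdrop]
    · have hitems : gsF ++ [PySem.Chars.strip cur] ≠ [] := by simp
      rw [show pvCore (gsF ++ [PySem.Chars.strip cur]) s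
            = gsF ++ [PySem.Chars.strip (PySem.Chars.strip cur ++ '\n' :: s)] by
          simp only [pvCore, hb]
          rw [if_neg (by simp), if_neg hitems, List.dropLast_concat,
            pv_getLast!_concat]]
      rw [pv_strip_merge cur ('\n' :: s) hcur]
      have hcur' : PySem.Chars.rstrip (cur ++ '\n' :: s) = cur ++ '\n' :: s := by
        rw [show cur ++ '\n' :: s = (cur ++ ['\n']) ++ s by simp]
        exact pv_rstrip_append _ s (pv_rstrip_of_strip s hs.1) hs.2
      rw [show cur ++ '\n' :: s = cur ++ '\n' :: s from rfl]
      rw [ih gsF (cur ++ '\n' :: s) hcur' (fun t ht => hrest t (by simp [ht]))]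
      simp [pvPcs, hb]

lemma pv_join_eq (l : List Char) (ls : List (List Char)) :
    PySem.Chars.join ['\n'] (l :: ls) = l ++ pvTfl ls := by
  induction ls generalizing l with
  | nil => simp [PySem.Chars.join_singleton, pvTfl]
  | cons q ls ih =>
    rw [PySem.Chars.join_cons_cons, ih q]
    simp [pvTfl]

lemma pv_main (content : String) (hpre : Pre_parse_list_content_py content) :
    parse_list_content_py content = parse_list_content_py_alt content := by
  rcases hC : ((PySem.Chars.splitlines content.toList).map PySem.Chars.strip).filter (· ≠ []) with _ | ⟨s, rest⟩
  · have hB : parse_list_content_py_alt content = [] := by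
      unfold parse_list_content_py_alt
      rw [hC]
      simp
    rw [hB]
    unfold parse_list_content_py
    split
    · rfl
    · rw [pv_foldl_A, hC]
      rfl
  · have hb : PySem.Chars.startswith s ['-', ' '] = true := by
      rcases hpre with h | h
      · rw [hC] at h; simp at h
      · rwa [hC] at h
    obtain ⟨x, hx⟩ := pv_bullet_decomp s hb
    have hsmem : PySem.Chars.strip s = s ∧ s ≠ [] :=
      pv_mem_cleaned content.toList s (by rw [hC]; simp)
    have hxr : PySem.Chars.rstrip x = x := (pv_drop2_rstrip x (hx ▸ hsmem.1)).1
    have hxnl : '\n' ∉ x := by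
      intro h
      exact pv_cleaned_no_nl content.toList s (by rw [hC]; simp) (by simp [hx, h])
    have hstripne : ¬ PySem.Str.strip content = "" := by
      intro h
      have hnil : PySem.Chars.strip content.toList = [] := by
        have := congrArg String.toList h
        simpa [PySem.Str.strip] using this
      rw [pv_cleaned_nil_of_strip_nil _ hnil] at hC
      simp at hC
    have hrest : ∀ t ∈ rest, PySem.Chars.strip t = t ∧ t ≠ [] := by
      intro t ht
      exact pv_mem_cleaned content.toList t (by rw [hC]; simp [ht])
    have hrestnl : ∀ t ∈ rest, '\n' ∉ t ∧ t ≠ [] := by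
      intro t ht
      exact ⟨pv_cleaned_no_nl content.toList t (by rw [hC]; simp [ht]), (hrest t ht).2⟩
    -- A side
    have hA : parse_list_content_py content
        = ((pvPcs x rest).map PySem.Chars.strip).map String.ofList := by
      unfold parse_list_content_py
      rw [if_neg hstripne, pv_foldl_A, hC]
      simp only [List.foldl_cons]
      have hslice : PySem.List.slice s (some 2) none = x := by
        rw [PySem.List.slice_from _ (show (0:Int) ≤ 2 by omega)]
        simp [hx]
      rw [show pvCore [] s = [] ++ [PySem.Chars.strip x] by simp [pvCore, hb, hslice]]
      rw [pv_core_pcs rest [] x hxr hrest]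
      simp
    -- B side
    have htext : PySem.Chars.join ['\n'] (s :: rest) = '-' :: ' ' :: (x ++ pvTfl rest) := by
      rw [pv_join_eq, hx]
      simp
    have hB : parse_list_content_py_alt content
        = ((pvPcs x rest).map PySem.Chars.strip).map String.ofList := by
      unfold parse_list_content_py_alt
      rw [hC]
      rw [if_neg (by simp)]
      simp only [htext]
      rw [if_pos (by
        rw [PySem.Chars.startswith_iff]
        exact ⟨x ++ pvTfl rest, rfl⟩)]
      have hslice2 : PySem.List.slice ('-' :: ' ' :: (x ++ pvTfl rest)) (some 2) none
          = x ++ pvTfl rest := by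
        rw [PySem.List.slice_from _ (show (0:Int) ≤ 2 by omega)]
        simp
      rw [hslice2]
      rw [show PySem.Chars.splitOn (x ++ pvTfl rest) ['\n', '-', ' ']
            = PySem.Chars.splitOn.go pvSep ((x ++ pvTfl rest).length + 1) (x ++ pvTfl rest) [] []
          from rfl]
      have := pv_go_pcs rest x [] [] 0 hxnl (by simp) hrestnl
      simp only [show pvTfl [] = [] from rfl, List.append_nil] at this
      rw [show (x ++ pvTfl rest).length + 1 = (x ++ pvTfl rest).length + 1 + 0 by omega]
      rw [this]
      simp
    rw [hA, hB]

-- ===== VERDICT (by name: the statement is the Claim_ definition above) =====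
theorem parse_list_content_py_spec : Claim_equal_parse_list_content_py := by
  intro content _ hpre
  exact pv_main content hpre
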